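-- pv_equiv track=rewrite | github.com/livekit/agents | livekit-plugins/livekit-plugins-soniox/livekit/plugins/soniox/stt.py | _merge_lang_segments
-- ===== SOURCE A (Python) =====
-- def _merge_lang_segments(
--     a: list[tuple[str, str]], b: list[tuple[str, str]]
-- ) -> list[tuple[str, str]]:
--     """Merge two (language, text) segment lists, combining adjacent segments of the same language."""
--     result = list(a)
--     for lang, text in b:
--         if result and result[-1][0] == lang:
--             lang, t = result[-1]
--             result[-1] = (lang, t + text)
--         else:
--             result.append((lang, text))
--     return result
-- ===== SOURCE B (Python) =====
-- def _merge_lang_segments(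
--     a: list[tuple[str, str]], b: list[tuple[str, str]]
-- ) -> list[tuple[str, str]]:
--     """Two-phase: collapse b into maximal same-language runs, then stitch them onto a copy of a."""
--     # Phase 1: collapse b into maximal consecutive same-language runs.
--     runs: list[tuple[str, str]] = []
--     cur = None
--     for lang, text in b:
--         if cur is not None and cur[0] == lang:
--             cur = (cur[0], cur[1] + text)
--         else:
--             if cur is not None:
--                 runs.append(cur)
--             cur = (lang, text)
--     if cur is not None:
--         runs.append(cur)
--     # Phase 2: stitch the collapsed runs onto a (a's own segments are never regrouped).
--     result = list(a)
--     for lang, text in runs: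
--         if result and result[-1][0] == lang:
--             l, t = result[-1]
--             result[-1] = (l, t + text)
--         else:
--             result.append((lang, text))
--     return result
-- ===== Notes on version B (the rewrite author's own statement) =====
-- stated objective: alternative
-- what changed: Replaced A's single pass that mutates the running result's last element per b-segment with a two-phase pass: first collapse b into maximal consecutive same-language runs, then stitch each collapsed run onto a copy of a.
import Mathlib
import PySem

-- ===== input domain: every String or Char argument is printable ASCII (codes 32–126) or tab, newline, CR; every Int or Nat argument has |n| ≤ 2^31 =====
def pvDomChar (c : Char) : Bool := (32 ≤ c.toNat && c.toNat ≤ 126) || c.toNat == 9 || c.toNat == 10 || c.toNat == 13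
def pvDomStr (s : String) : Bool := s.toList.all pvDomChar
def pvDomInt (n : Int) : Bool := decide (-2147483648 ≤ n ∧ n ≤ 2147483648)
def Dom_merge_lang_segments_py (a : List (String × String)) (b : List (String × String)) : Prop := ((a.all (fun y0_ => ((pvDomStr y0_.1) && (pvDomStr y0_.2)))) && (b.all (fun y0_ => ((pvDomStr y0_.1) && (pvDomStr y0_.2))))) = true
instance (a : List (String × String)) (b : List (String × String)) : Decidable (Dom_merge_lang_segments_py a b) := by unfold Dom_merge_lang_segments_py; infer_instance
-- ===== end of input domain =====

-- B restructures A's single merging pass into two phases (collapse b's same-language runs, then stitch onto a); same output, same cost.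


-- ===== PORT A =====
-- one iteration of A's loop body: inspect result[-1], merge or append
def mergeStepA (res : List (String × String)) (seg : String × String) : List (String × String) :=
  match res.getLast? with
  | some (l0, t0) => if l0 = seg.1 then res.dropLast ++ [(l0, t0 ++ seg.2)] else res ++ [seg]
  | none => res ++ [seg]

def merge_lang_segments_py (a : List (String × String)) (b : List (String × String)) : List (String × String) :=
  b.foldl mergeStepA a

-- ===== PORT B =====
-- Phase 1 of B: collapse b into maximal consecutive same-language runs ('cur' carried as (l, t))
def collapseGo (l t : String) : List (String × String) → List (String × String)
  | [] => [(l, t)]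
  | (l', t') :: rest => if l' = l then collapseGo l (t ++ t') rest else (l, t) :: collapseGo l' t' rest

def collapseRuns : List (String × String) → List (String × String)
  | [] => []
  | (l, t) :: rest => collapseGo l t rest

-- Phase 2 of B: stitch one collapsed run onto the result prefix
def stitchStep (res : List (String × String)) (run : String × String) : List (String × String) :=
  match res.getLast? with
  | some (l0, t0) => if l0 = run.1 then res.dropLast ++ [(l0, t0 ++ run.2)] else res ++ [run]
  | none => res ++ [run]

def merge_lang_segments_py_alt (a : List (String × String)) (b : List (String × String)) : List (String × String) :=
  (collapseRuns b).foldl stitchStep a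

-- ===== PRECONDITION & SPEC =====
def Spec_merge_lang_segments_py (a : List (String × String)) (b : List (String × String)) (out : List (String × String)) : Prop := out = merge_lang_segments_py_alt a b
instance (a : List (String × String)) (b : List (String × String)) (out : List (String × String)) : Decidable (Spec_merge_lang_segments_py a b out) := by unfold Spec_merge_lang_segments_py; infer_instance

-- ===== CLAIM (what is proved, stated in full; the proofs are below) =====
def Claim_equal_merge_lang_segments_py : Prop := ∀ (a : List (String × String)) (b : List (String × String)), Dom_merge_lang_segments_py a b → Spec_merge_lang_segments_py a b (merge_lang_segments_py a b)

-- ===== LEMMAS AND PROOFS =====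

-- the two step functions are definitionally equal
lemma stitchStep_eq_mergeStepA : stitchStep = mergeStepA := rfl

-- merging two same-language segments in two steps equals one step with the concatenated text
lemma mergeStepA_merge (res : List (String × String)) (l t u : String) :
    mergeStepA (mergeStepA res (l, t)) (l, u) = mergeStepA res (l, t ++ u) := by
  unfold mergeStepA
  rcases h : res.getLast? with _ | ⟨l0, t0⟩
  · simp [List.getLast?_concat, List.dropLast_concat]
  · by_cases hl : l0 = l
    · subst hl
      simp [List.getLast?_concat, List.dropLast_concat, String.append_assoc]
    · simp [hl, List.getLast?_concat, List.dropLast_concat]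

-- the key loop correspondence: folding A's step over a raw run equals folding it over the collapsed run
lemma foldl_collapseGo (rest : List (String × String)) :
    ∀ (l t : String) (res : List (String × String)),
      rest.foldl mergeStepA (mergeStepA res (l, t)) =
        (collapseGo l t rest).foldl mergeStepA res := by
  induction rest with
  | nil => intro l t res; simp [collapseGo]
  | cons x rest ih =>
    intro l t res
    obtain ⟨l', t'⟩ := x
    by_cases hl : l' = l
    · subst hl
      rw [List.foldl_cons, mergeStepA_merge, ih]
      simp [collapseGo]
    · simp only [collapseGo, if_neg hl, List.foldl_cons]
      exact ih l' t' (mergeStepA res (l, t))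

-- ===== VERDICT (by name: the statement is the Claim_ definition above) =====
theorem merge_lang_segments_py_spec : Claim_equal_merge_lang_segments_py := by
  intro a b _
  unfold Spec_merge_lang_segments_py merge_lang_segments_py merge_lang_segments_py_alt
  rw [stitchStep_eq_mergeStepA]
  cases b with
  | nil => simp [collapseRuns]
  | cons x rest =>
    obtain ⟨l, t⟩ := x
    simp only [collapseRuns, List.foldl_cons]
    exact foldl_collapseGo rest l t a
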